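-- pv_equiv track=rewrite | github.com/astrolisacademy/Text-To-Video-AI | utility/captions/timed_captions_generator.py | split_into_lines
-- ===== SOURCE A (Python) =====
-- def split_into_lines(sentence, max_chars_per_line=40):
--     words = sentence.split()
--     lines = []
--     current_line = []
--     current_length = 0
--
--     for word in words:
--         if current_length + len(word) + 1 <= max_chars_per_line:
--             current_line.append(word)
--             current_length += len(word) + 1
--         else:
--             if current_line:
--                 lines.append(' '.join(current_line))
--             current_line = [word]
--             current_length = len(word) + 1
--
--     if current_line:
--         lines.append(' '.join(current_line))
--
--     # Combine into maximum two lines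
--     if len(lines) > 2:
--         # If more than 2 lines, combine the remaining lines into the second line
--         lines = [lines[0], ' '.join(lines[1:])]
--
--     return '\n'.join(lines)
-- ===== SOURCE B (Python) =====
-- def split_into_lines(sentence, max_chars_per_line=40):
--     words = sentence.split()
--     if not words:
--         return ''
--     # first line: first word plus as many following words as fit greedily
--     split_idx = 1
--     length = len(words[0]) + 1
--     for w in words[1:]:
--         if length + len(w) + 1 > max_chars_per_line:
--             break
--         split_idx += 1
--         length += len(w) + 1
--     first = ' '.join(words[:split_idx])
--     rest = ' '.join(words[split_idx:])
--     return first + '\n' + rest if rest else first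
-- ===== Notes on version B (the rewrite author's own statement) =====
-- stated objective: simpler
-- what changed: Instead of building a list of wrapped lines and then merging lines[1:] back together, B scans once for the first line's break point and joins words[:split_idx] and words[split_idx:] directly into at most two lines.
import Mathlib
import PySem

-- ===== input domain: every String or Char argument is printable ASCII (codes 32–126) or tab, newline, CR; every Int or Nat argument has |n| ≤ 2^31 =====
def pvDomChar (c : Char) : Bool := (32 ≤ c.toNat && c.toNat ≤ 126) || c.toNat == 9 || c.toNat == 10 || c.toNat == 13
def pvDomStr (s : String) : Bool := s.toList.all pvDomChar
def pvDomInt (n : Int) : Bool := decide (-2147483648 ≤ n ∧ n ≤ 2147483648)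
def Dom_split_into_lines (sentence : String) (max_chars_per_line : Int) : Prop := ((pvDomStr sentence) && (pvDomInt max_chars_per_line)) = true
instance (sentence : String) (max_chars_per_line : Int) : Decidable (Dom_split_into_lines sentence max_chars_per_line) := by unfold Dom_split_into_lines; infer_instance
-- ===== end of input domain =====

-- B finds only the first line's break point in one scan and joins the remaining words
-- directly into the second line, removing A's line-list building and its merge step
-- (simpler decomposition; same asymptotic cost).

-- ===== PORT A =====
def split_into_lines (sentence : String) (max_chars_per_line : Int) : String :=
  let words := PySem.Str.split₀ sentence
  let st := words.foldl
    (fun (st : List String × List String × Int) word =>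
      if st.2.2 + PySem.Str.len word + 1 ≤ max_chars_per_line then
        (st.1, st.2.1 ++ [word], st.2.2 + PySem.Str.len word + 1)
      else
        (if st.2.1 ≠ [] then st.1 ++ [PySem.Str.join " " st.2.1] else st.1,
         [word], PySem.Str.len word + 1))
    ([], [], 0)
  let lines := if st.2.1 ≠ [] then st.1 ++ [PySem.Str.join " " st.2.1] else st.1
  let lines2 := if 2 < PySem.List.len lines then
      [PySem.List.pyGetD lines 0 "", PySem.Str.join " " (PySem.List.slice lines (some 1) none)]
    else lines
  PySem.Str.join "\n" lines2

-- ===== PORT B =====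
-- the for-loop with break over words[1:], carrying (split_idx, length)
def altScan (max_chars_per_line : Int) : List String → Int → Int → Int × Int
  | [], split_idx, length => (split_idx, length)
  | w :: ws, split_idx, length =>
    if max_chars_per_line < length + PySem.Str.len w + 1 then (split_idx, length)
    else altScan max_chars_per_line ws (split_idx + 1) (length + PySem.Str.len w + 1)

def split_into_lines_alt (sentence : String) (max_chars_per_line : Int) : String :=
  match PySem.Str.split₀ sentence with
  | [] => ""
  | w0 :: ws =>
    let split_idx := (altScan max_chars_per_line ws 1 (PySem.Str.len w0 + 1)).1
    let first := PySem.Str.join " " (PySem.List.slice (w0 :: ws) none (some split_idx))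
    let rest := PySem.Str.join " " (PySem.List.slice (w0 :: ws) (some split_idx) none)
    if rest = "" then first else first ++ "\n" ++ rest

-- ===== PRECONDITION & SPEC =====
def Spec_split_into_lines (sentence : String) (max_chars_per_line : Int) (out : String) : Prop := out = split_into_lines_alt sentence max_chars_per_line
instance (sentence : String) (max_chars_per_line : Int) (out : String) : Decidable (Spec_split_into_lines sentence max_chars_per_line out) := by unfold Spec_split_into_lines; infer_instance

-- ===== CLAIM (what is proved, stated in full; the proofs are below) =====
def Claim_equal_split_into_lines : Prop := ∀ (sentence : String) (max_chars_per_line : Int), Dom_split_into_lines sentence max_chars_per_line → Spec_split_into_lines sentence max_chars_per_line (split_into_lines sentence max_chars_per_line)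

-- ===== LEMMAS AND PROOFS =====

-- A's loop body and epilogue, named for the proofs
def aStep (max_chars_per_line : Int) (st : List String × List String × Int) (word : String) :
    List String × List String × Int :=
  if st.2.2 + PySem.Str.len word + 1 ≤ max_chars_per_line then
    (st.1, st.2.1 ++ [word], st.2.2 + PySem.Str.len word + 1)
  else
    (if st.2.1 ≠ [] then st.1 ++ [PySem.Str.join " " st.2.1] else st.1,
     [word], PySem.Str.len word + 1)

def aFinal (st : List String × List String × Int) : String :=
  let lines := if st.2.1 ≠ [] then st.1 ++ [PySem.Str.join " " st.2.1] else st.1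
  let lines2 := if 2 < PySem.List.len lines then
      [PySem.List.pyGetD lines 0 "", PySem.Str.join " " (PySem.List.slice lines (some 1) none)]
    else lines
  PySem.Str.join "\n" lines2

def F (max_chars_per_line : Int) (st : List String × List String × Int) (rest : List String) : String :=
  aFinal (List.foldl (aStep max_chars_per_line) st rest)

theorem A_eq (sentence : String) (max_chars_per_line : Int) :
    split_into_lines sentence max_chars_per_line =
      F max_chars_per_line ([], [], 0) (PySem.Str.split₀ sentence) := rfl

-- ' '.join, abbreviated
def sj (l : List String) : String := PySem.Str.join " " l

theorem join_empty (sep : String) : PySem.Str.join sep [] = "" := by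
  apply String.toList_inj.mp
  simp [PySem.Str.toList_join, PySem.Chars.join_nil]

theorem join_single (sep a : String) : PySem.Str.join sep [a] = a := by
  apply String.toList_inj.mp
  simp [PySem.Str.toList_join, PySem.Chars.join_singleton]

theorem join_cons_cons (sep a b : String) (r : List String) :
    PySem.Str.join sep (a :: b :: r) = a ++ sep ++ PySem.Str.join sep (b :: r) := by
  apply String.toList_inj.mp
  simp [PySem.Str.toList_join, PySem.Chars.join_cons_cons]

theorem join_pair (sep a b : String) : PySem.Str.join sep [a, b] = a ++ sep ++ b := by
  rw [join_cons_cons, join_single]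

theorem sj_append (xs ys : List String) (hx : xs ≠ []) (hy : ys ≠ []) :
    sj (xs ++ ys) = sj xs ++ " " ++ sj ys := by
  induction xs with
  | nil => exact absurd rfl hx
  | cons x xs ih =>
    cases xs with
    | nil =>
      cases ys with
      | nil => exact absurd rfl hy
      | cons y ys => simp [sj, join_cons_cons, join_single]
    | cons x' xs' =>
      have : (x' :: xs') ++ ys ≠ [] := by simp
      calc sj ((x :: x' :: xs') ++ ys) = x ++ " " ++ sj ((x' :: xs') ++ ys) := by
            simpa [sj] using join_cons_cons " " x x' (xs' ++ ys)
        _ = x ++ " " ++ (sj (x' :: xs') ++ " " ++ sj ys) := by rw [ih (by simp)]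
        _ = sj (x :: x' :: xs') ++ " " ++ sj ys := by
            simp [sj, join_cons_cons, String.append_assoc]

theorem sj_single (x : String) : sj [x] = x := join_single " " x

theorem sj_mid (cur : List String) (hc : cur ≠ []) (L R : List String) :
    sj (L ++ [sj cur] ++ R) = sj (L ++ cur ++ R) := by
  rcases Decidable.em (L = []) with hL | hL <;> rcases Decidable.em (R = []) with hR | hR
  · subst hL hR; simp [sj_single]
  · subst hL
    simp only [List.nil_append]
    rw [sj_append [sj cur] R (by simp) hR, sj_append cur R hc hR, sj_single]
  · subst hR
    simp only [List.append_nil]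
    rw [sj_append L [sj cur] hL (by simp), sj_append L cur hL hc, sj_single]
  · rw [List.append_assoc, sj_append L ([sj cur] ++ R) hL (by simp),
        sj_append [sj cur] R (by simp) hR,
        List.append_assoc, sj_append L (cur ++ R) hL (by simp [hc]),
        sj_append cur R hc hR, sj_single, String.append_assoc]

theorem F_cons (m : Int) (st : List String × List String × Int) (w : String) (rest : List String) :
    F m st (w :: rest) = F m (aStep m st w) rest := rfl

theorem aStep_pos (m : Int) (L cur : List String) (len : Int) (w : String)
    (h : len + PySem.Str.len w + 1 ≤ m) :
    aStep m (L, cur, len) w = (L, cur ++ [w], len + PySem.Str.len w + 1) := by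
  dsimp only [aStep]; rw [if_pos h]

theorem aStep_neg (m : Int) (L cur : List String) (len : Int) (w : String)
    (h : ¬ (len + PySem.Str.len w + 1 ≤ m)) (hc : cur ≠ []) :
    aStep m (L, cur, len) w = (L ++ [sj cur], [w], PySem.Str.len w + 1) := by
  dsimp only [aStep]; rw [if_neg h, if_pos hc]; rfl

theorem aStep_neg_nil (m : Int) (L : List String) (len : Int) (w : String)
    (h : ¬ (len + PySem.Str.len w + 1 ≤ m)) :
    aStep m (L, [], len) w = (L, [w], PySem.Str.len w + 1) := by
  dsimp only [aStep]; rw [if_neg h]; simp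

-- the number of further words the greedy first line takes
def countFit (max_chars_per_line : Int) : Int → List String → Nat
  | _, [] => 0
  | len, w :: ws =>
    if len + PySem.Str.len w + 1 ≤ max_chars_per_line then
      countFit max_chars_per_line (len + PySem.Str.len w + 1) ws + 1
    else 0

theorem countFit_le (m : Int) : ∀ (ws : List String) (len : Int), countFit m len ws ≤ ws.length := by
  intro ws
  induction ws with
  | nil => intro len; simp [countFit]
  | cons w ws ih =>
    intro len
    rw [countFit]
    split_ifs with h
    · exact Nat.succ_le_succ (ih _)
    · exact Nat.zero_le _

theorem altScan_fst (m : Int) : ∀ (ws : List String) (idx len : Int),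
    (altScan m ws idx len).1 = idx + (countFit m len ws : Int) := by
  intro ws
  induction ws with
  | nil => intro idx len; simp [altScan, countFit]
  | cons w ws ih =>
    intro idx len
    by_cases h : len + PySem.Str.len w + 1 ≤ m
    · have h' : ¬ m < len + PySem.Str.len w + 1 := not_lt.mpr h
      rw [altScan, if_neg h', ih, countFit, if_pos h]
      push_cast; ring
    · have h' : m < len + PySem.Str.len w + 1 := not_le.mp h
      rw [altScan, if_pos h', countFit, if_neg h]
      simp

theorem F_tail (m : Int) : ∀ (rest : List String) (first : String) (L cur : List String) (len : Int),
    cur ≠ [] →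
    F m (first :: L, cur, len) rest = first ++ "\n" ++ sj (L ++ cur ++ rest) := by
  intro rest
  induction rest with
  | nil =>
    intro first L cur len hc
    cases L with
    | nil =>
      simp only [F, List.foldl_nil, aFinal, if_pos hc]
      simp [PySem.List.len_eq, sj, join_pair]
    | cons l L' =>
      simp only [F, List.foldl_nil, aFinal, if_pos hc]
      have hlen : 2 < PySem.List.len ((first :: l :: L') ++ [PySem.Str.join " " cur]) := by
        simp [PySem.List.len_eq]; omega
      rw [if_pos hlen]
      have hget : PySem.List.pyGetD ((first :: l :: L') ++ [PySem.Str.join " " cur]) 0 "" = first :=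
        PySem.List.pyGetD_zero_cons _ _ _
      have hslice : PySem.List.slice ((first :: l :: L') ++ [PySem.Str.join " " cur]) (some 1) none
          = (l :: L') ++ [PySem.Str.join " " cur] := by
        rw [PySem.List.slice_from _ (by norm_num : (0:Int) ≤ 1)]
        simp
      rw [hget, hslice, join_pair]
      have := sj_mid cur hc (l :: L') []
      simp only [List.append_nil] at this
      show first ++ "\n" ++ sj ((l :: L') ++ [sj cur]) = _
      rw [this]
      simp
  | cons w rest' ih =>
    intro first L cur len hc
    by_cases h : len + PySem.Str.len w + 1 ≤ m
    · rw [F_cons, aStep_pos m (first :: L) cur len w h, ih first L (cur ++ [w]) _ (by simp)]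
      simp
    · rw [F_cons, aStep_neg m (first :: L) cur len w h hc,
          show (first :: L) ++ [sj cur] = first :: (L ++ [sj cur]) by simp,
          ih first (L ++ [sj cur]) [w] _ (by simp)]
      have : (L ++ [sj cur]) ++ [w] ++ rest' = L ++ [sj cur] ++ ([w] ++ rest') := by simp
      rw [this, sj_mid cur hc L ([w] ++ rest')]
      simp

theorem F_head (m : Int) : ∀ (rest : List String) (cur : List String) (len : Int),
    cur ≠ [] →
    F m ([], cur, len) rest =
      if countFit m len rest = rest.length then sj (cur ++ rest)
      else sj (cur ++ rest.take (countFit m len rest)) ++ "\n" ++ sj (rest.drop (countFit m len rest)) := by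
  intro rest
  induction rest with
  | nil =>
    intro cur len hc
    simp only [countFit, List.length_nil, List.append_nil]
    simp only [F, List.foldl_nil, aFinal, if_pos hc]
    simp [PySem.List.len_eq, sj, join_single]
  | cons w rest' ih =>
    intro cur len hc
    by_cases h : len + PySem.Str.len w + 1 ≤ m
    · rw [F_cons, aStep_pos m [] cur len w h, ih (cur ++ [w]) _ (by simp)]
      rw [countFit, if_pos h]
      by_cases hk : countFit m (len + PySem.Str.len w + 1) rest' = rest'.length
      · rw [if_pos hk, if_pos (by simpa [PySem.Str.len_eq] using hk)]
        simp
      · rw [if_neg hk, if_neg (by simpa [PySem.Str.len_eq] using hk)]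
        simp [List.take_succ_cons, List.drop_succ_cons]
    · rw [F_cons, aStep_neg m [] cur len w h hc,
          show ([] : List String) ++ [sj cur] = [sj cur] by simp,
          F_tail m rest' (sj cur) [] [w] _ (by simp)]
      rw [countFit, if_neg h]
      rw [if_neg (by simp)]
      simp

theorem split₀_go_ne_nil : ∀ (s cur : List Char) (acc : List (List Char)),
    (∀ t ∈ acc, t ≠ []) → ∀ t ∈ PySem.Chars.split₀.go s cur acc, t ≠ [] := by
  intro s
  induction s with
  | nil =>
    intro cur acc hacc t ht
    rw [PySem.Chars.split₀.go] at ht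
    by_cases hcur : cur.isEmpty
    · rw [if_pos hcur] at ht
      exact hacc t (List.mem_reverse.mp ht)
    · rw [if_neg hcur] at ht
      rcases List.mem_cons.mp (List.mem_reverse.mp ht) with h | h
      · simp only [h]
        intro hn
        exact hcur (by simpa [List.isEmpty_iff] using List.reverse_eq_nil_iff.mp hn)
      · exact hacc t h
  | cons c s ih =>
    intro cur acc hacc t ht
    rw [PySem.Chars.split₀.go] at ht
    by_cases hsp : PySem.Chars.isspace c
    · rw [if_pos hsp] at ht
      by_cases hcur : cur.isEmpty
      · rw [if_pos hcur] at ht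
        exact ih [] acc hacc t ht
      · rw [if_neg hcur] at ht
        refine ih [] _ ?_ t ht
        intro u hu
        rcases List.mem_cons.mp hu with h | h
        · simp only [h]
          intro hn
          exact hcur (by simpa [List.isEmpty_iff] using List.reverse_eq_nil_iff.mp hn)
        · exact hacc u h
    · rw [if_neg hsp] at ht
      exact ih (c :: cur) acc hacc t ht

theorem mem_split₀_ne_empty (s x : String) (hx : x ∈ PySem.Str.split₀ s) : x ≠ "" := by
  intro hxe
  have hmem : x.toList ∈ (PySem.Str.split₀ s).map String.toList := List.mem_map_of_mem hx
  rw [PySem.Str.split₀_map_toList] at hmem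
  have := split₀_go_ne_nil s.toList [] [] (by simp) x.toList hmem
  exact this (by simp [hxe])

theorem sj_ne_empty (l : List String) (hl : l ≠ []) (h : ∀ t ∈ l, t ≠ "") : sj l ≠ "" := by
  cases l with
  | nil => exact absurd rfl hl
  | cons x l' =>
    cases l' with
    | nil =>
      simpa [sj, join_single] using h x (by simp)
    | cons y r =>
      intro he
      have := congrArg String.toList he
      rw [sj, join_cons_cons] at this
      simp [String.toList_append] at this

-- ===== VERDICT (by name: the statement is the Claim_ definition above) =====
theorem split_into_lines_spec : Claim_equal_split_into_lines := by
  intro sentence m _hdom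
  show split_into_lines sentence m = split_into_lines_alt sentence m
  rw [A_eq]
  rcases hw : PySem.Str.split₀ sentence with _ | ⟨w0, ws⟩
  · simp only [split_into_lines_alt, hw]
    simp [F, aFinal, PySem.List.len_eq, join_empty]
  · have hfirst : F m ([], [], 0) (w0 :: ws) = F m ([], [w0], PySem.Str.len w0 + 1) ws := by
      rw [F_cons]
      by_cases h : (0 : Int) + PySem.Str.len w0 + 1 ≤ m
      · rw [aStep_pos m [] [] 0 w0 h]; norm_num
      · rw [aStep_neg_nil m [] 0 w0 h]
    set k := countFit m (PySem.Str.len w0 + 1) ws with hk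
    have hA := F_head m ws [w0] (PySem.Str.len w0 + 1) (by simp)
    -- B side
    have hidx : (altScan m ws 1 (PySem.Str.len w0 + 1)).1 = 1 + (k : Int) :=
      altScan_fst m ws 1 (PySem.Str.len w0 + 1)
    have hslice1 : PySem.List.slice (w0 :: ws) none (some (1 + (k : Int)))
        = w0 :: ws.take k := by
      rw [PySem.List.slice_to _ (by positivity : (0:Int) ≤ 1 + (k:Int))]
      have : ((1 + (k:Int))).toNat = k + 1 := by omega
      rw [this, List.take_succ_cons]
    have hslice2 : PySem.List.slice (w0 :: ws) (some (1 + (k : Int))) none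
        = ws.drop k := by
      rw [PySem.List.slice_from _ (by positivity : (0:Int) ≤ 1 + (k:Int))]
      have : ((1 + (k:Int))).toNat = k + 1 := by omega
      rw [this, List.drop_succ_cons]
    simp only [split_into_lines_alt, hw, hidx, hslice1, hslice2]
    by_cases hkl : k = ws.length
    · have hdrop : ws.drop k = [] := by simp [hkl]
      have htake : ws.take k = ws := by simp [hkl]
      rw [hfirst, hA, if_pos hkl, hdrop, htake]
      rw [show PySem.Str.join " " [] = "" from join_empty " ", if_pos rfl]
      rfl
    · have hlt : k < ws.length := lt_of_le_of_ne (countFit_le m ws _) hkl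
      have hdropne : ws.drop k ≠ [] := by
        simp only [ne_eq, List.drop_eq_nil_iff]
        omega
      have hrestne : PySem.Str.join " " (ws.drop k) ≠ "" := by
        refine sj_ne_empty _ hdropne ?_
        intro t ht
        refine mem_split₀_ne_empty sentence t ?_
        rw [hw]
        exact List.mem_cons_of_mem w0 (List.mem_of_mem_drop ht)
      rw [hfirst, hA, if_neg hkl, if_neg hrestne]
      rfl
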